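-- pv_equiv track=rewrite | github.com/WuYudaPKU/CS101_PekingUniversity | part_2/最大通域面积plus.py | max_adj_area
-- ===== SOURCE A (Python) =====
-- def dfs(matrix,x,y,visited):
--     #如果越界，或接触边界，或接触已经标记的点，立刻终止递归并返回0
--     if (x<0 or x>=len(matrix) or y<0 or y>=len(matrix[0])
--             or matrix[x][y]!="W" or visited[x][y]):
--         return 0
--     visited[x][y]=True
--     area=1
--     directions = [(-1, -1), (-1, 0), (-1, 1), (0, -1), (0, 1),
--                   (1, -1), (1, 0), (1, 1)]
--     for dx, dy in directions:
--         area += dfs(matrix, x + dx, y + dy, visited)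
--     return area
--
-- def max_adj_area(matrix):
--     rows,cols=len(matrix),len(matrix[0])
--     visited=[[False for _ in range(cols)] for _ in range(rows)]
--     max_area=0
--     for row in range(rows):
--         for col in range(cols):
--             if matrix[row][col]=="W" and not visited[row][col]:
--                 area=dfs(matrix,row,col,visited)
--                 max_area=max(max_area,area)
--     return max_area
-- ===== SOURCE B (Python) =====
-- def max_adj_area(matrix):
--     rows, cols = len(matrix), len(matrix[0])
--     seen = set()
--     best = 0
--     for r in range(rows):
--         for c in range(cols):
--             if matrix[r][c] == "W" and (r, c) not in seen:
--                 area = 0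
--                 stack = [(r, c)]
--                 while stack:
--                     x, y = stack.pop()
--                     if (x < 0 or x >= rows or y < 0 or y >= cols
--                             or matrix[x][y] != "W" or (x, y) in seen):
--                         continue
--                     seen.add((x, y))
--                     area += 1
--                     # push in reverse so neighbours are explored in natural order
--                     stack.extend((x + dx, y + dy)
--                                  for dx in (1, 0, -1) for dy in (1, 0, -1)
--                                  if dx or dy)
--                 best = max(best, area)
--     return best
-- ===== Notes on version B (the rewrite author's own statement) =====
-- stated objective: alternative
-- what changed: The recursive 8-direction DFS with a rows x cols visited-grid is replaced by an explicit-stack flood fill that keeps the seen cells in a set of (row, col) pairs, accumulating each component's area iteratively.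
-- outside the precondition, e.g. on max_adj_area([]): A raises IndexError, B raises IndexError; on max_adj_area([['W', 'W'], ['W']]): A raises IndexError, B raises IndexError
import Mathlib
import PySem

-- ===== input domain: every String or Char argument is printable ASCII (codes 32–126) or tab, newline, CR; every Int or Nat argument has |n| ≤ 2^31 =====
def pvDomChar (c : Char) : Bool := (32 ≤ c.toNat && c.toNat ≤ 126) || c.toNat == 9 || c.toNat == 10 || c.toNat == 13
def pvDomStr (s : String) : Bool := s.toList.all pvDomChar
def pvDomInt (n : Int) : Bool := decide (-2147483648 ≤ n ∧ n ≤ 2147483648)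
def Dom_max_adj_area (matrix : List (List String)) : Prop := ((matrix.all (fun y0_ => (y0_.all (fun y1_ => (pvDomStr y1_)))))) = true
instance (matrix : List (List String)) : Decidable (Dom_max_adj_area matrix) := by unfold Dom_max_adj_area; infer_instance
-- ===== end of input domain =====

-- B replaces the recursive 8-direction DFS by an explicit-stack flood fill over a set of
-- seen coordinates (no visited grid, no recursion); same return value, alternative structure.

-- ===== PORT A =====
-- shared indexing helper: matrix[x][y] / visited[x][y], only evaluated under in-range guards
def pvCell (m : List (List String)) (x y : Int) : String :=
  (m.getD x.toNat []).getD y.toNat ""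

def pvVget (v : List (List Bool)) (x y : Int) : Bool :=
  (v.getD x.toNat []).getD y.toNat false

def pvVset (v : List (List Bool)) (x y : Int) : List (List Bool) :=
  v.set x.toNat ((v.getD x.toNat []).set y.toNat true)

def pvDirs : List (Int × Int) :=
  [(-1,-1),(-1,0),(-1,1),(0,-1),(0,1),(1,-1),(1,0),(1,1)]

-- recursive dfs of A; the Nat argument is a totality fuel only (always given enough at the call site)
def pvDfs (m : List (List String)) (x y : Int) (v : List (List Bool)) : Nat → Int × List (List Bool)
  | 0 => (0, v)
  | fuel+1 =>
    if x < 0 ∨ (m.length : Int) ≤ x ∨ y < 0 ∨ (m.headI.length : Int) ≤ y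
        ∨ pvCell m x y ≠ "W" ∨ pvVget v x y = true then (0, v)
    else
      pvDirs.foldl (fun av d =>
        let r := pvDfs m (x + d.1) (y + d.2) av.2 fuel
        (av.1 + r.1, r.2)) (1, pvVset v x y)

def max_adj_area (matrix : List (List String)) : Int :=
  let rows := matrix.length
  let cols := matrix.headI.length
  let v0 := List.replicate rows (List.replicate cols false)
  ((List.range rows).foldl (fun (st : Int × List (List Bool)) (row : Nat) =>
    (List.range cols).foldl (fun (st : Int × List (List Bool)) (col : Nat) =>
      if pvCell matrix row col = "W" ∧ pvVget st.2 row col = false then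
        let r := pvDfs matrix row col st.2 (rows * cols + 1)
        (max st.1 r.1, r.2)
      else st) st) (0, v0)).1

-- ===== PORT B =====
-- neighbours in push (generator) order; popping explores them in reverse
def pvNbrs (x y : Int) : List (Int × Int) :=
  [(x+1,y+1),(x+1,y),(x+1,y-1),(x,y+1),(x,y-1),(x-1,y+1),(x-1,y),(x-1,y-1)]

-- the while-stack loop of B (stack top at head); fuel is a totality guard only
def pvFlood (m : List (List String)) (stack : List (Int × Int)) (area : Int)
    (seen : PySem.Set (Int × Int)) : Nat → Int × PySem.Set (Int × Int)
  | 0 => (area, seen)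
  | fuel+1 =>
    match stack with
    | [] => (area, seen)
    | (x, y) :: rest =>
      if x < 0 ∨ (m.length : Int) ≤ x ∨ y < 0 ∨ (m.headI.length : Int) ≤ y
          ∨ pvCell m x y ≠ "W" ∨ (x, y) ∈ seen then
        pvFlood m rest area seen fuel
      else
        pvFlood m ((pvNbrs x y).reverse ++ rest) (area + 1)
          (PySem.Set.add seen (x, y)) fuel

def max_adj_area_alt (matrix : List (List String)) : Int :=
  let rows := matrix.length
  let cols := matrix.headI.length
  ((List.range rows).foldl (fun (st : Int × PySem.Set (Int × Int)) (r : Nat) =>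
    (List.range cols).foldl (fun (st : Int × PySem.Set (Int × Int)) (c : Nat) =>
      if pvCell matrix r c = "W" ∧ ¬ ((r : Int), (c : Int)) ∈ st.2 then
        let res := pvFlood matrix [((r : Int), (c : Int))] 0 st.2 (9 * rows * cols + 2)
        (max st.1 res.1, res.2)
      else st) st) ((0 : Int), (PySem.Set.empty : PySem.Set (Int × Int)))).1

-- ===== PRECONDITION & SPEC =====
-- Pre_ excludes exactly the inputs where Python A raises IndexError: the empty matrix
-- (len(matrix[0])) and ragged matrices with some row shorter than the first row.
def Pre_max_adj_area (matrix : List (List String)) : Prop :=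
  matrix ≠ [] ∧ ∀ row ∈ matrix, matrix.headI.length ≤ row.length
instance (matrix : List (List String)) : Decidable (Pre_max_adj_area matrix) := by
  unfold Pre_max_adj_area; infer_instance

def pvWitness_max_adj_area : List (List String) := [["W", "L"], ["L", "W"]]

def Spec_max_adj_area (matrix : List (List String)) (out : Int) : Prop := out = max_adj_area_alt matrix
instance (matrix : List (List String)) (out : Int) : Decidable (Spec_max_adj_area matrix out) := by unfold Spec_max_adj_area; infer_instance

-- ===== CLAIM (what is proved, stated in full; the proofs are below) =====
def Claim_equal_max_adj_area : Prop := ∀ (matrix : List (List String)), Dom_max_adj_area matrix → Pre_max_adj_area matrix → Spec_max_adj_area matrix (max_adj_area matrix)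

-- ===== LEMMAS AND PROOFS =====

-- all in-range coordinates of the grid
def gridList (m : List (List String)) : List (Int × Int) :=
  ((List.range m.length) ×ˢ (List.range m.headI.length)).map
    (fun q => ((q.1 : Int), (q.2 : Int)))

def pvUV (m : List (List String)) (v : List (List Bool)) : Nat :=
  ((gridList m).filter (fun p => !(pvVget v p.1 p.2))).length

def pvUB (m : List (List String)) (s : List (Int × Int)) : Nat :=
  ((gridList m).filter (fun p => decide (p ∉ s))).length

def inRange (m : List (List String)) (p : Int × Int) : Prop :=
  0 ≤ p.1 ∧ p.1 < m.length ∧ 0 ≤ p.2 ∧ p.2 < m.headI.length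

def shapeOk (m : List (List String)) (v : List (List Bool)) : Prop :=
  v.length = m.length ∧ ∀ i (h : i < v.length), v[i].length = m.headI.length

def pvRel (m : List (List String)) (v : List (List Bool)) (s : List (Int × Int)) : Prop :=
  shapeOk m v ∧ ∀ p : Int × Int, p ∈ s ↔ (inRange m p ∧ pvVget v p.1 p.2 = true)

-- canonical-fuel wrappers
def DfsC (m : List (List String)) (x y : Int) (v : List (List Bool)) : Int × List (List Bool) :=
  pvDfs m x y v (pvUV m v + 1)

def FloodC (m : List (List String)) (stack : List (Int × Int)) (area : Int)
    (seen : PySem.Set (Int × Int)) : Int × PySem.Set (Int × Int) :=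
  pvFlood m stack area seen (stack.length + 9 * pvUB m seen + 1)

-- canonical dfs fold step (proof-side only)
def cstep (m : List (List String)) (x y : Int) (av : Int × List (List Bool))
    (d : Int × Int) : Int × List (List Bool) :=
  (av.1 + (DfsC m (x + d.1) (y + d.2) av.2).1, (DfsC m (x + d.1) (y + d.2) av.2).2)

theorem grid_mem (m : List (List String)) (p : Int × Int) :
    p ∈ gridList m ↔ inRange m p := by
  obtain ⟨px, py⟩ := p
  simp only [gridList, inRange, List.mem_map, List.mem_product, List.mem_range, Prod.exists]
  constructor
  · rintro ⟨i, j, ⟨hi, hj⟩, h⟩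
    have h1 := (Prod.mk.inj h).1
    have h2 := (Prod.mk.inj h).2
    simp only at h1 h2 ⊢
    omega
  · rintro ⟨h1, h2, h3, h4⟩
    refine ⟨px.toNat, py.toNat, ⟨by omega, by omega⟩, ?_⟩
    have : (px.toNat : Int) = px := by omega
    have h2' : (py.toNat : Int) = py := by omega
    rw [this, h2']
theorem grid_nodup (m : List (List String)) : (gridList m).Nodup := by
  apply List.Nodup.map
  · intro a b h
    have h1 := (Prod.mk.inj h).1
    have h2 := (Prod.mk.inj h).2
    exact Prod.ext (by exact_mod_cast h1) (by exact_mod_cast h2)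
  · exact List.Nodup.product List.nodup_range List.nodup_range
theorem grid_len (m : List (List String)) :
    (gridList m).length = m.length * m.headI.length := by
  simp [gridList, List.length_product]
theorem filter_len_step {α : Type} [DecidableEq α] (l : List α) (p : α) (f g : α → Bool)
    (hn : l.Nodup) (hp : p ∈ l) (hf : f p = true) (hg : g p = false)
    (ho : ∀ q ∈ l, q ≠ p → g q = f q) :
    (l.filter g).length + 1 = (l.filter f).length := by
  induction l with
  | nil => simp at hp
  | cons a t ih =>
    by_cases hap : a = p
    · subst hap
      have hnt : a ∉ t := (List.nodup_cons.mp hn).1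
      have hfe : t.filter g = t.filter f :=
        List.filter_congr (fun q hq => ho q (List.mem_cons_of_mem _ hq) (fun h => hnt (h ▸ hq)))
      simp [List.filter_cons, hf, hg, hfe]
    · have hpt : p ∈ t := by
        rcases List.mem_cons.mp hp with h | h
        · exact absurd h.symm hap
        · exact h
      have hga : g a = f a := ho a List.mem_cons_self hap
      have ihh := ih (List.nodup_cons.mp hn).2 hpt
        (fun q hq hqp => ho q (List.mem_cons_of_mem _ hq) hqp)
      by_cases hfa : f a = true <;> simp [List.filter_cons, hga, hfa, ihh] <;> omega
theorem vget_vset_self (m : List (List String)) (v : List (List Bool)) (x y : Int)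
    (hs : shapeOk m v) (hx0 : 0 ≤ x) (hx : x < m.length) (hy0 : 0 ≤ y) (hy : y < m.headI.length) :
    pvVget (pvVset v x y) x y = true := by
  obtain ⟨hl, hr⟩ := hs
  have hxv : x.toNat < v.length := by omega
  have hyr : y.toNat < ((v.getD x.toNat []).set y.toNat true).length := by
    rw [List.length_set, List.getD_eq_getElem _ _ hxv, hr _ hxv]; omega
  unfold pvVget pvVset
  simp only [List.getD_eq_getElem?_getD] at hyr ⊢
  rw [List.getElem?_set_self hxv, Option.getD_some,
      List.getElem?_eq_getElem hyr, Option.getD_some, List.getElem_set_self]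
theorem vget_vset_other (v : List (List Bool)) (x y i j : Int)
    (hx0 : 0 ≤ x) (hy0 : 0 ≤ y) (hi0 : 0 ≤ i) (hj0 : 0 ≤ j)
    (hne : (i, j) ≠ (x, y)) :
    pvVget (pvVset v x y) i j = pvVget v i j := by
  unfold pvVget pvVset
  simp only [List.getD_eq_getElem?_getD]
  by_cases hix : i.toNat = x.toNat
  · have hij : j.toNat ≠ y.toNat := by
      intro h
      exact hne (by ext <;> simp <;> omega)
    rw [hix]
    by_cases hlt : x.toNat < v.length
    · rw [List.getElem?_set_self hlt, Option.getD_some, List.getElem?_set_ne (by omega)]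
    · rw [List.set_eq_of_length_le (by omega)]
  · rw [List.getElem?_set_ne (by omega)]
theorem shapeOk_vset (m : List (List String)) (v : List (List Bool)) (x y : Int)
    (hs : shapeOk m v) : shapeOk m (pvVset v x y) := by
  obtain ⟨hl, hr⟩ := hs
  refine ⟨by simp [pvVset, hl], ?_⟩
  intro i h
  unfold pvVset at h ⊢
  rw [List.length_set] at h
  by_cases hix : i = x.toNat
  · subst hix
    rw [List.getElem_set_self (by simpa using h), List.length_set, List.getD_eq_getElem _ _ h, hr _ h]
  · rw [List.getElem_set_ne (by omega)]
    exact hr _ h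
theorem UV_vset (m : List (List String)) (v : List (List Bool)) (x y : Int)
    (hs : shapeOk m v) (hx0 : 0 ≤ x) (hx : x < m.length) (hy0 : 0 ≤ y) (hy : y < m.headI.length)
    (hv : pvVget v x y = false) :
    pvUV m (pvVset v x y) + 1 = pvUV m v := by
  unfold pvUV
  apply filter_len_step (p := (x, y))
  · exact grid_nodup m
  · exact (grid_mem m _).2 ⟨hx0, hx, hy0, hy⟩
  · simp [hv]
  · simp [vget_vset_self m v x y hs hx0 hx hy0 hy]
  · intro q hq hqp
    have hr := (grid_mem m q).1 hq
    simp only [Bool.not_eq_eq_eq_not]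
    rw [vget_vset_other v x y q.1 q.2 hx0 hy0 hr.1 hr.2.2.1 (by simpa [Prod.ext_iff] using hqp)]
    simp
theorem UB_add (m : List (List String)) (s : List (Int × Int)) (p : Int × Int)
    (hin : inRange m p) (hns : p ∉ s) :
    pvUB m (PySem.Set.add s p) + 1 = pvUB m s := by
  unfold pvUB
  apply filter_len_step (p := p)
  · exact grid_nodup m
  · exact (grid_mem m _).2 hin
  · simp [hns]
  · simp [PySem.Set.mem_add]
  · intro q hq hqp
    simp [PySem.Set.mem_add, hqp]
theorem UV_le (m : List (List String)) (v : List (List Bool)) :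
    pvUV m v ≤ m.length * m.headI.length := by
  rw [← grid_len m]; exact List.length_filter_le _ _
theorem UB_le (m : List (List String)) (s : List (Int × Int)) :
    pvUB m s ≤ m.length * m.headI.length := by
  rw [← grid_len m]; exact List.length_filter_le _ _
theorem pvRel_set_add (m : List (List String)) (v : List (List Bool)) (s : List (Int × Int))
    (x y : Int) (h : pvRel m v s) (hx0 : 0 ≤ x) (hx : x < m.length) (hy0 : 0 ≤ y)
    (hy : y < m.headI.length) :
    pvRel m (pvVset v x y) (PySem.Set.add s (x, y)) := by
  obtain ⟨hs, hmem⟩ := h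
  refine ⟨shapeOk_vset m v x y hs, ?_⟩
  intro p
  rw [PySem.Set.mem_add]
  by_cases hp : p = (x, y)
  · subst hp
    simp [vget_vset_self m v x y hs hx0 hx hy0 hy]
    exact ⟨hx0, hx, hy0, hy⟩
  · simp only [hp, or_false]
    by_cases hin : inRange m p
    · rw [hmem p, vget_vset_other v x y p.1 p.2 hx0 hy0 hin.1 hin.2.2.1
        (by simpa [Prod.ext_iff] using hp)]
    · constructor
      · intro hps
        exact absurd ((hmem p).1 hps).1 hin
      · intro hcon
        exact absurd hcon.1 hin
theorem dfs_main (k : Nat) : ∀ (m : List (List String)) (x y : Int) (v : List (List Bool)) (f : Nat),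
    shapeOk m v → pvUV m v ≤ k → pvUV m v < f →
    pvDfs m x y v f = DfsC m x y v ∧
    shapeOk m (pvDfs m x y v f).2 ∧
    pvUV m (pvDfs m x y v f).2 + (pvDfs m x y v f).1.toNat = pvUV m v ∧
    0 ≤ (pvDfs m x y v f).1 := by
  induction k using Nat.strong_induction_on with
  | _ k ih =>
  intro m x y v f hs hk hf
  match f with
  | 0 => omega
  | f + 1 =>
  by_cases hg : x < 0 ∨ (m.length : Int) ≤ x ∨ y < 0 ∨ (m.headI.length : Int) ≤ y
      ∨ pvCell m x y ≠ "W" ∨ pvVget v x y = true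
  · have e1 : pvDfs m x y v (f + 1) = (0, v) := by
      simp only [pvDfs, if_pos hg]
    have e2 : DfsC m x y v = (0, v) := by
      simp only [DfsC, pvDfs, if_pos hg]
    rw [e1, e2]
    exact ⟨rfl, hs, by simp, by simp⟩
  · push_neg at hg
    obtain ⟨hx0, hxr, hy0, hyc, hcw, hvf⟩ := hg
    have hvf' : pvVget v x y = false := by
      cases h : pvVget v x y
      · rfl
      · exact absurd h hvf
    have hUV : pvUV m (pvVset v x y) + 1 = pvUV m v :=
      UV_vset m v x y hs hx0 hxr hy0 hyc hvf'
    have hs1 : shapeOk m (pvVset v x y) := shapeOk_vset m v x y hs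
    have hgP : ¬(x < 0 ∨ (m.length : Int) ≤ x ∨ y < 0 ∨ (m.headI.length : Int) ≤ y
        ∨ pvCell m x y ≠ "W" ∨ pvVget v x y = true) := by
      push_neg
      exact ⟨hx0, hxr, hy0, hyc, hcw, by simp [hvf']⟩
    have e1 : pvDfs m x y v (f + 1) =
        pvDirs.foldl (fun av d =>
          (av.1 + (pvDfs m (x + d.1) (y + d.2) av.2 f).1,
            (pvDfs m (x + d.1) (y + d.2) av.2 f).2)) (1, pvVset v x y) := by
      simp only [pvDfs, if_neg hgP]
    have e2 : DfsC m x y v =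
        pvDirs.foldl (fun av d =>
          (av.1 + (pvDfs m (x + d.1) (y + d.2) av.2 (pvUV m v)).1,
            (pvDfs m (x + d.1) (y + d.2) av.2 (pvUV m v)).2)) (1, pvVset v x y) := by
      have : pvUV m v + 1 = (pvUV m v) + 1 := rfl
      simp only [DfsC, pvDfs, if_neg hgP]
    -- fold lemma with bound b := pvUV m (pvVset v x y)
    have hb : pvUV m (pvVset v x y) < k := by omega
    have H : ∀ (x' y' : Int) (v' : List (List Bool)) (f' : Nat),
        shapeOk m v' → pvUV m v' ≤ pvUV m (pvVset v x y) → pvUV m v' < f' →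
        pvDfs m x' y' v' f' = DfsC m x' y' v' ∧
        shapeOk m (pvDfs m x' y' v' f').2 ∧
        pvUV m (pvDfs m x' y' v' f').2 + (pvDfs m x' y' v' f').1.toNat = pvUV m v' ∧
        0 ≤ (pvDfs m x' y' v' f').1 := by
      intro x' y' v' f' a b c
      exact ih _ hb m x' y' v' f' a b c
    have hfold : ∀ (ds : List (Int × Int)) (a₀ : Int) (v₀ : List (List Bool)),
        shapeOk m v₀ → pvUV m v₀ ≤ pvUV m (pvVset v x y) → 0 ≤ a₀ →
        (ds.foldl (fun av d =>
          (av.1 + (pvDfs m (x + d.1) (y + d.2) av.2 f).1,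
            (pvDfs m (x + d.1) (y + d.2) av.2 f).2)) (a₀, v₀) =
         ds.foldl (fun av d =>
          (av.1 + (pvDfs m (x + d.1) (y + d.2) av.2 (pvUV m v)).1,
            (pvDfs m (x + d.1) (y + d.2) av.2 (pvUV m v)).2)) (a₀, v₀)) ∧
        shapeOk m (ds.foldl (fun av d =>
          (av.1 + (pvDfs m (x + d.1) (y + d.2) av.2 f).1,
            (pvDfs m (x + d.1) (y + d.2) av.2 f).2)) (a₀, v₀)).2 ∧
        pvUV m (ds.foldl (fun av d =>
          (av.1 + (pvDfs m (x + d.1) (y + d.2) av.2 f).1,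
            (pvDfs m (x + d.1) (y + d.2) av.2 f).2)) (a₀, v₀)).2 +
          ((ds.foldl (fun av d =>
          (av.1 + (pvDfs m (x + d.1) (y + d.2) av.2 f).1,
            (pvDfs m (x + d.1) (y + d.2) av.2 f).2)) (a₀, v₀)).1).toNat =
          pvUV m v₀ + a₀.toNat ∧
        0 ≤ (ds.foldl (fun av d =>
          (av.1 + (pvDfs m (x + d.1) (y + d.2) av.2 f).1,
            (pvDfs m (x + d.1) (y + d.2) av.2 f).2)) (a₀, v₀)).1 := by
      intro ds
      induction ds with
      | nil =>
        intro a₀ v₀ h1 h2 h3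
        exact ⟨rfl, h1, by simp, h3⟩
      | cons d t iht =>
        intro a₀ v₀ h1 h2 h3
        have hf1 : pvUV m v₀ < f := by omega
        have hfc : pvUV m v₀ < pvUV m v := by omega
        obtain ⟨q1, q2, q3, q4⟩ := H (x + d.1) (y + d.2) v₀ f h1 h2 hf1
        obtain ⟨w1, w2, w3, w4⟩ := H (x + d.1) (y + d.2) v₀ (pvUV m v) h1 h2 hfc
        simp only [List.foldl_cons]
        rw [q1, w1]
        have hUVle : pvUV m (DfsC m (x + d.1) (y + d.2) v₀).2 ≤ pvUV m (pvVset v x y) := by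
          rw [q1] at q3
          omega
        have hsh : shapeOk m (DfsC m (x + d.1) (y + d.2) v₀).2 := by rw [q1] at q2; exact q2
        have hnn : 0 ≤ (DfsC m (x + d.1) (y + d.2) v₀).1 := by rw [q1] at q4; exact q4
        obtain ⟨r1, r2, r3, r4⟩ := iht (a₀ + (DfsC m (x + d.1) (y + d.2) v₀).1)
          (DfsC m (x + d.1) (y + d.2) v₀).2 hsh hUVle (by omega)
        refine ⟨r1, r2, ?_, r4⟩
        rw [r3]
        rw [q1] at q3
        have : (a₀ + (DfsC m (x + d.1) (y + d.2) v₀).1).toNat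
            = a₀.toNat + ((DfsC m (x + d.1) (y + d.2) v₀).1).toNat := by omega
        omega
    have hUV1le : pvUV m (pvVset v x y) ≤ pvUV m (pvVset v x y) := le_rfl
    obtain ⟨r1, r2, r3, r4⟩ := hfold pvDirs 1 (pvVset v x y) hs1 hUV1le (by norm_num)
    rw [e1, e2] at *
    refine ⟨by rw [r1], r2, ?_, r4⟩
    rw [r3]
    omega

theorem dfs_all (m : List (List String)) (x y : Int) (v : List (List Bool)) (f : Nat)
    (hs : shapeOk m v) (hf : pvUV m v < f) :
    pvDfs m x y v f = DfsC m x y v ∧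
    shapeOk m (pvDfs m x y v f).2 ∧
    pvUV m (pvDfs m x y v f).2 + (pvDfs m x y v f).1.toNat = pvUV m v ∧
    0 ≤ (pvDfs m x y v f).1 :=
  dfs_main (pvUV m v) m x y v f hs le_rfl hf

theorem dfs_props (m : List (List String)) (x y : Int) (v : List (List Bool))
    (hs : shapeOk m v) :
    shapeOk m (DfsC m x y v).2 ∧
    pvUV m (DfsC m x y v).2 + ((DfsC m x y v).1).toNat = pvUV m v ∧
    0 ≤ (DfsC m x y v).1 := by
  have h := dfs_all m x y v (pvUV m v + 1) hs (by omega)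
  rw [h.1] at *
  exact ⟨h.2.1, h.2.2.1, h.2.2.2⟩

theorem flood_main (k : Nat) : ∀ (m : List (List String)) (st : List (Int × Int)) (area : Int)
    (s : PySem.Set (Int × Int)) (f₁ f₂ : Nat),
    st.length + 9 * pvUB m s ≤ k →
    st.length + 9 * pvUB m s < f₁ → st.length + 9 * pvUB m s < f₂ →
    pvFlood m st area s f₁ = pvFlood m st area s f₂ := by
  induction k using Nat.strong_induction_on with
  | _ k ih =>
  intro m st area s f₁ f₂ hk h1 h2
  match st, f₁, f₂ with
  | [], 0, 0 => rfl
  | [], 0, f₂ + 1 => rfl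
  | [], f₁ + 1, 0 => rfl
  | [], f₁ + 1, f₂ + 1 => rfl
  | (x, y) :: rest, f₁, f₂ =>
    match f₁, f₂ with
    | 0, _ => omega
    | _ + 1, 0 => omega
    | f₁ + 1, f₂ + 1 =>
      simp only [pvFlood]
      by_cases hg : x < 0 ∨ (m.length : Int) ≤ x ∨ y < 0 ∨ (m.headI.length : Int) ≤ y
          ∨ pvCell m x y ≠ "W" ∨ (x, y) ∈ s
      · rw [if_pos hg, if_pos hg]
        have hlt : rest.length + 9 * pvUB m s < k := by
          simp only [List.length_cons] at hk
          omega
        apply ih _ hlt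
        · omega
        · simp only [List.length_cons] at h1; omega
        · simp only [List.length_cons] at h2; omega
      · rw [if_neg hg, if_neg hg]
        push_neg at hg
        obtain ⟨hx0, hxr, hy0, hyc, hcw, hnm⟩ := hg
        have hUB : pvUB m (PySem.Set.add s (x, y)) + 1 = pvUB m s :=
          UB_add m s (x, y) ⟨hx0, hxr, hy0, hyc⟩ hnm
        have hlen : ((pvNbrs x y).reverse ++ rest).length = 8 + rest.length := by
          simp [pvNbrs]
          omega
        have hμ : ((pvNbrs x y).reverse ++ rest).length
            + 9 * pvUB m (PySem.Set.add s (x, y)) < k := by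
          rw [hlen]
          simp only [List.length_cons] at hk
          omega
        apply ih _ hμ
        · omega
        · rw [hlen]; simp only [List.length_cons] at h1; omega
        · rw [hlen]; simp only [List.length_cons] at h2; omega

theorem nbrs_eq (x y : Int) :
    (pvNbrs x y).reverse = pvDirs.map (fun d => (x + d.1, y + d.2)) := by
  simp only [pvNbrs, pvDirs, List.reverse_cons, List.reverse_nil, List.nil_append,
    List.cons_append, List.map_cons, List.map_nil]
  norm_num
  omega

theorem pvFlood_cons (m : List (List String)) (x y : Int) (rest : List (Int × Int))
    (area : Int) (s : PySem.Set (Int × Int)) (f : Nat) :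
    pvFlood m ((x, y) :: rest) area s (f + 1) =
      if x < 0 ∨ (m.length : Int) ≤ x ∨ y < 0 ∨ (m.headI.length : Int) ≤ y
          ∨ pvCell m x y ≠ "W" ∨ (x, y) ∈ s then
        pvFlood m rest area s f
      else
        pvFlood m ((pvNbrs x y).reverse ++ rest) (area + 1) (PySem.Set.add s (x, y)) f := rfl

theorem floodC_nil (m : List (List String)) (area : Int) (s : PySem.Set (Int × Int)) :
    FloodC m [] area s = (area, s) := by
  simp [FloodC, pvFlood]

theorem floodC_skip (m : List (List String)) (x y : Int) (rest : List (Int × Int))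
    (area : Int) (s : PySem.Set (Int × Int))
    (hg : x < 0 ∨ (m.length : Int) ≤ x ∨ y < 0 ∨ (m.headI.length : Int) ≤ y
        ∨ pvCell m x y ≠ "W" ∨ (x, y) ∈ s) :
    FloodC m ((x, y) :: rest) area s = FloodC m rest area s := by
  unfold FloodC
  have e : ((x, y) :: rest).length + 9 * pvUB m s + 1
      = (rest.length + 9 * pvUB m s + 1) + 1 := by
    simp only [List.length_cons]
    omega
  rw [e, pvFlood_cons, if_pos hg]

theorem floodC_mark (m : List (List String)) (x y : Int) (rest : List (Int × Int))
    (area : Int) (s : PySem.Set (Int × Int))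
    (hg : ¬(x < 0 ∨ (m.length : Int) ≤ x ∨ y < 0 ∨ (m.headI.length : Int) ≤ y
        ∨ pvCell m x y ≠ "W" ∨ (x, y) ∈ s)) :
    FloodC m ((x, y) :: rest) area s
      = FloodC m ((pvNbrs x y).reverse ++ rest) (area + 1) (PySem.Set.add s (x, y)) := by
  have hg' := hg
  push_neg at hg'
  obtain ⟨hx0, hxr, hy0, hyc, hcw, hnm⟩ := hg'
  have hUB : pvUB m (PySem.Set.add s (x, y)) + 1 = pvUB m s :=
    UB_add m s (x, y) ⟨hx0, hxr, hy0, hyc⟩ hnm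
  have hlen : ((pvNbrs x y).reverse ++ rest).length = 8 + rest.length := by
    simp [pvNbrs]; omega
  unfold FloodC
  have e : ((x, y) :: rest).length + 9 * pvUB m s + 1
      = (rest.length + 1 + 9 * pvUB m s) + 1 := by
    simp only [List.length_cons]
  rw [e, pvFlood_cons, if_neg hg]
  apply flood_main (((pvNbrs x y).reverse ++ rest).length
      + 9 * pvUB m (PySem.Set.add s (x, y))) m _ _ _ _ _ le_rfl
  · rw [hlen]; omega
  · rw [hlen]; omega

theorem bridge (k : Nat) : ∀ (m : List (List String)) (x y : Int) (v : List (List Bool))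
    (s : PySem.Set (Int × Int)) (rest : List (Int × Int)) (area : Int),
    pvRel m v s → pvUV m v ≤ k →
    ∃ s', pvRel m (DfsC m x y v).2 s' ∧
      FloodC m ((x, y) :: rest) area s = FloodC m rest (area + (DfsC m x y v).1) s' := by
  induction k using Nat.strong_induction_on with
  | _ k ih =>
  intro m x y v s rest area hrel hk
  by_cases hg : x < 0 ∨ (m.length : Int) ≤ x ∨ y < 0 ∨ (m.headI.length : Int) ≤ y
      ∨ pvCell m x y ≠ "W" ∨ pvVget v x y = true
  · -- A's guard fires; B's guard fires too (same first five disjuncts, Rel for the last)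
    have hgB : x < 0 ∨ (m.length : Int) ≤ x ∨ y < 0 ∨ (m.headI.length : Int) ≤ y
        ∨ pvCell m x y ≠ "W" ∨ (x, y) ∈ s := by
      rcases hg with h | h | h | h | h | h
      · exact Or.inl h
      · exact Or.inr (Or.inl h)
      · exact Or.inr (Or.inr (Or.inl h))
      · exact Or.inr (Or.inr (Or.inr (Or.inl h)))
      · exact Or.inr (Or.inr (Or.inr (Or.inr (Or.inl h))))
      · by_cases hin : inRange m (x, y)
        · exact Or.inr (Or.inr (Or.inr (Or.inr (Or.inr ((hrel.2 (x, y)).2 ⟨hin, h⟩))))) 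
        · unfold inRange at hin
          push_neg at hin
          simp only at hin
          by_cases h1 : 0 ≤ x
          · by_cases h2 : x < (m.length : Int)
            · by_cases h3 : 0 ≤ y
              · exact Or.inr (Or.inr (Or.inr (Or.inl (by
                  have := hin h1 h2 h3
                  omega)))) 
              · exact Or.inr (Or.inr (Or.inl (by omega)))
            · exact Or.inr (Or.inl (by omega))
          · exact Or.inl (by omega)
    have eD : DfsC m x y v = (0, v) := by
      simp only [DfsC, pvDfs, if_pos hg]
    refine ⟨s, by rw [eD]; exact hrel, ?_⟩
    rw [floodC_skip m x y rest area s hgB, eD]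
    norm_num
  · have hgB : ¬(x < 0 ∨ (m.length : Int) ≤ x ∨ y < 0 ∨ (m.headI.length : Int) ≤ y
        ∨ pvCell m x y ≠ "W" ∨ (x, y) ∈ s) := by
      push_neg at hg ⊢
      obtain ⟨hx0, hxr, hy0, hyc, hcw, hvf⟩ := hg
      refine ⟨hx0, hxr, hy0, hyc, hcw, ?_⟩
      intro hmem
      exact hvf ((hrel.2 (x, y)).1 hmem).2
    push_neg at hg
    obtain ⟨hx0, hxr, hy0, hyc, hcw, hvf⟩ := hg
    have hvf' : pvVget v x y = false := by
      cases h : pvVget v x y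
      · rfl
      · exact absurd h hvf
    have hrel1 : pvRel m (pvVset v x y) (PySem.Set.add s (x, y)) :=
      pvRel_set_add m v s x y hrel hx0 hxr hy0 hyc
    have hUV : pvUV m (pvVset v x y) + 1 = pvUV m v :=
      UV_vset m v x y hrel.1 hx0 hxr hy0 hyc hvf'
    have hb : pvUV m (pvVset v x y) < k := by omega
    -- canonical form of DfsC at this cell
    have eD : DfsC m x y v = pvDirs.foldl (cstep m x y) (1, pvVset v x y) := by
      have hgP : ¬(x < 0 ∨ (m.length : Int) ≤ x ∨ y < 0 ∨ (m.headI.length : Int) ≤ y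
          ∨ pvCell m x y ≠ "W" ∨ pvVget v x y = true) := by
        push_neg
        exact ⟨hx0, hxr, hy0, hyc, hcw, by simp [hvf']⟩
      have e1 : DfsC m x y v =
          pvDirs.foldl (fun av d =>
            (av.1 + (pvDfs m (x + d.1) (y + d.2) av.2 (pvUV m v)).1,
              (pvDfs m (x + d.1) (y + d.2) av.2 (pvUV m v)).2)) (1, pvVset v x y) := by
        simp only [DfsC, pvDfs, if_neg hgP]
      rw [e1]
      -- replace fixed fuel (pvUV m v) by canonical calls along the fold
      have : ∀ (ds : List (Int × Int)) (a₀ : Int) (v₀ : List (List Bool)),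
          shapeOk m v₀ → pvUV m v₀ < pvUV m v →
          ds.foldl (fun av d =>
            (av.1 + (pvDfs m (x + d.1) (y + d.2) av.2 (pvUV m v)).1,
              (pvDfs m (x + d.1) (y + d.2) av.2 (pvUV m v)).2)) (a₀, v₀)
          = ds.foldl (cstep m x y) (a₀, v₀) := by
        intro ds
        induction ds with
        | nil => intro a₀ v₀ _ _; rfl
        | cons d t iht =>
          intro a₀ v₀ h1 h2
          obtain ⟨q1, q2, q3, q4⟩ := dfs_all m (x + d.1) (y + d.2) v₀ (pvUV m v) h1 h2
          simp only [List.foldl_cons]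
          rw [q1]
          rw [q1] at q2 q3
          unfold cstep
          exact iht _ _ q2 (by omega)
      exact this pvDirs 1 (pvVset v x y) hrel1.1 (by omega)
    -- flood: mark the cell and consume the mapped neighbour list
    rw [floodC_mark m x y rest area s hgB, nbrs_eq, eD]
    -- inner fold bridging
    have hfold : ∀ (ds : List (Int × Int)) (a₀ : Int) (v₀ : List (List Bool))
        (s₀ : PySem.Set (Int × Int)) (rest' : List (Int × Int)) (area' : Int),
        pvRel m v₀ s₀ → pvUV m v₀ ≤ pvUV m (pvVset v x y) →
        ∃ s', pvRel m (ds.foldl (cstep m x y) (a₀, v₀)).2 s' ∧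
          FloodC m ((ds.map (fun d => (x + d.1, y + d.2))) ++ rest') area' s₀
            = FloodC m rest' (area' + ((ds.foldl (cstep m x y) (a₀, v₀)).1 - a₀)) s' := by
      intro ds
      induction ds with
      | nil =>
        intro a₀ v₀ s₀ rest' area' h1 h2
        refine ⟨s₀, h1, ?_⟩
        simp
      | cons d t iht =>
        intro a₀ v₀ s₀ rest' area' h1 h2
        obtain ⟨s₁, hr1, he1⟩ := ih _ hb m (x + d.1) (y + d.2) v₀ s₀
          ((t.map (fun d => (x + d.1, y + d.2))) ++ rest') area' h1 h2
        obtain ⟨p1, p2, p3⟩ := dfs_props m (x + d.1) (y + d.2) v₀ h1.1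
        have hle : pvUV m (DfsC m (x + d.1) (y + d.2) v₀).2 ≤ pvUV m (pvVset v x y) := by
          omega
        obtain ⟨s', hr2, he2⟩ := iht (a₀ + (DfsC m (x + d.1) (y + d.2) v₀).1)
          (DfsC m (x + d.1) (y + d.2) v₀).2 s₁ rest'
          (area' + (DfsC m (x + d.1) (y + d.2) v₀).1) hr1 hle
        refine ⟨s', ?_, ?_⟩
        · simpa only [List.foldl_cons, cstep] using hr2
        · simp only [List.map_cons, List.cons_append]
          rw [he1, he2]
          simp only [List.foldl_cons, cstep]
          congr 1
          ring
    obtain ⟨s', hr, he⟩ := hfold pvDirs 1 (pvVset v x y) (PySem.Set.add s (x, y)) rest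
      (area + 1) hrel1 le_rfl
    refine ⟨s', hr, ?_⟩
    rw [he]
    congr 1
    ring

theorem foldl_rel {α β γ : Type} (R : β → γ → Prop) (f : β → α → β) (g : γ → α → γ) :
    ∀ (l : List α), (∀ b c a, a ∈ l → R b c → R (f b a) (g c a)) →
    ∀ b c, R b c → R (l.foldl f b) (l.foldl g c) := by
  intro l
  induction l with
  | nil => intro _ b c h; exact h
  | cons a t ih =>
    intro hstep b c h
    exact ih (fun b' c' a' ha' => hstep b' c' a' (List.mem_cons_of_mem _ ha'))
      (f b a) (g c a) (hstep b c a List.mem_cons_self h)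

theorem vget_init (m : List (List String)) (x y : Int) :
    pvVget (List.replicate m.length (List.replicate m.headI.length false)) x y = false := by
  unfold pvVget
  simp only [List.getD_eq_getElem?_getD, List.getElem?_replicate]
  split_ifs with h1
  · simp only [Option.getD_some, List.getElem?_replicate]
    split_ifs with h2 <;> rfl
  · rfl

theorem pvRel_init (m : List (List String)) :
    pvRel m (List.replicate m.length (List.replicate m.headI.length false)) [] := by
  refine ⟨⟨by simp, ?_⟩, ?_⟩
  · intro i h
    simp at h ⊢
  · intro p
    simp [vget_init]

theorem outer_eq (m : List (List String)) : max_adj_area m = max_adj_area_alt m := by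
  unfold max_adj_area max_adj_area_alt
  refine (foldl_rel
    (fun (stA : Int × List (List Bool)) (stB : Int × PySem.Set (Int × Int)) =>
      stA.1 = stB.1 ∧ pvRel m stA.2 stB.2)
    _ _ (List.range m.length) ?_ _ _ ⟨rfl, pvRel_init m⟩).1
  intro stA stB r hr hR
  refine foldl_rel
    (fun (stA : Int × List (List Bool)) (stB : Int × PySem.Set (Int × Int)) =>
      stA.1 = stB.1 ∧ pvRel m stA.2 stB.2)
    _ _ (List.range m.headI.length) ?_ stA stB hR
  intro sA sB c hc hRel
  obtain ⟨heq, hrel⟩ := hRel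
  have hrR : ((r : Int)) < (m.length : Int) := by
    have := List.mem_range.1 hr
    omega
  have hcC : ((c : Int)) < (m.headI.length : Int) := by
    have := List.mem_range.1 hc
    omega
  have hin : inRange m ((r : Int), (c : Int)) := ⟨by omega, hrR, by omega, hcC⟩
  have hmemiff : ((r : Int), (c : Int)) ∈ sB.2 ↔ pvVget sA.2 r c = true := by
    rw [hrel.2 ((r : Int), (c : Int))]
    simp [hin]
  by_cases hcnd : pvCell m r c = "W" ∧ pvVget sA.2 r c = false
  · have hcndB : pvCell m r c = "W" ∧ ¬((r : Int), (c : Int)) ∈ sB.2 := by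
      refine ⟨hcnd.1, ?_⟩
      rw [hmemiff, hcnd.2]
      simp
    rw [if_pos hcnd, if_pos hcndB]
    have hfA : pvUV m sA.2 < m.length * m.headI.length + 1 := by
      have := UV_le m sA.2
      omega
    obtain ⟨e1, _, _, _⟩ := dfs_all m r c sA.2 (m.length * m.headI.length + 1) hrel.1 hfA
    have e2 : pvFlood m [((r : Int), (c : Int))] 0 sB.2 (9 * m.length * m.headI.length + 2)
        = FloodC m [((r : Int), (c : Int))] 0 sB.2 := by
      unfold FloodC
      apply flood_main ([((r : Int), (c : Int))].length + 9 * pvUB m sB.2)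
        m _ _ _ _ _ le_rfl
      · have := UB_le m sB.2
        have e9 : 9 * m.length * m.headI.length = 9 * (m.length * m.headI.length) := by ring
        simp only [List.length_singleton]
        omega
      · omega
    obtain ⟨s', hr', he'⟩ := bridge (pvUV m sA.2) m r c sA.2 sB.2 [] 0 hrel le_rfl
    rw [floodC_nil] at he'
    refine ⟨?_, ?_⟩
    · simp only [e1, e2, he', heq]
      norm_num
    · simp only [e1, e2, he']
      simpa using hr'
  · have hcndB : ¬(pvCell m r c = "W" ∧ ¬((r : Int), (c : Int)) ∈ sB.2) := by
      intro hB
      apply hcnd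
      refine ⟨hB.1, ?_⟩
      cases h : pvVget sA.2 r c
      · rfl
      · exact absurd (hmemiff.2 h) hB.2
    rw [if_neg hcnd, if_neg hcndB]
    exact ⟨heq, hrel⟩

-- ===== VERDICT (by name: the statement is the Claim_ definition above) =====
theorem max_adj_area_spec : Claim_equal_max_adj_area := by
  intro matrix _ _
  unfold Spec_max_adj_area
  exact outer_eq matrix
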